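-- pv_equiv track=rewrite | github.com/khaos10/cs50p | 2_loops/pset2/plates/plates.py | numbers_at_end
-- ===== SOURCE A (Python) =====
-- def numbers_at_end(s):
--     if s.isalpha():
--         return True
--     else:
--         for i in range(len(s)):
--             if s[i].isnumeric():
--                 if s[i] == "0":
--                     return False
--                 elif not s[i:len(s)].isnumeric():
--                     return False
--                 else:
--                     return True
-- ===== SOURCE B (Python) =====
-- def numbers_at_end(s):
--     if s.isalpha():
--         return True
--     k = len(s)
--     while k > 0 and s[k - 1].isnumeric():
--         k -= 1
--     return k < len(s) and s[k] != "0" and not any(c.isnumeric() for c in s[:k])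
-- ===== Notes on version B (the rewrite author's own statement) =====
-- stated objective: simpler
-- what changed: A scans front-to-back for the first numeric char and re-validates the whole suffix with isnumeric(); B walks backwards once to find the start of the trailing digit run and returns one boolean expression; Pre_ excludes strings that are neither alphabetic nor contain a digit, on which A falls through and returns None (no bool value) while B returns False.
-- outside the precondition, e.g. on numbers_at_end('a b'): A returns None, B returns False
import Mathlib
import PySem

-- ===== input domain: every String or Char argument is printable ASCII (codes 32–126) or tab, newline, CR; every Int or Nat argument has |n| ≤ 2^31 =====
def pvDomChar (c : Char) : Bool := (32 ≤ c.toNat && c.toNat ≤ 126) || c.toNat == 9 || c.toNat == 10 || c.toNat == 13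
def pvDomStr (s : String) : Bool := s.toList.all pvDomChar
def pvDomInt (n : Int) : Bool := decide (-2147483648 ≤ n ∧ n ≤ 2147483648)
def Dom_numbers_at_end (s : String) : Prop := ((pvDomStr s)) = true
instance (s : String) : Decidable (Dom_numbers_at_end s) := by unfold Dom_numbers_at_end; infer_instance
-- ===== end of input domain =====

-- B replaces A's front-to-back scan (which re-checks the whole suffix with isnumeric) by one
-- backwards walk locating the trailing digit run and a single boolean expression: simpler.
-- On the ASCII domain str.isnumeric/char.isnumeric coincide with PySem's isdigit predicates (exact there).

-- ===== PORT A =====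
-- the 'for i in range(len(s))' loop, first numeric char decides; falling off the end = None
def pvLoopA : List Char → Option Bool
  | [] => none
  | c :: rest =>
    if PySem.Chars.isdigit c then
      if c = '0' then some false
      else if ¬ (PySem.Chars.strIsdigit (c :: rest) = true) then some false  -- s[i:len(s)].isnumeric()
      else some true
    else pvLoopA rest

def numbers_at_end (s : String) : Option Bool :=
  if PySem.Str.strIsalpha s then some true
  else pvLoopA s.toList

-- ===== PORT B =====
-- Source B: walk k from len(s) down while s[k-1] is a digit (= takeWhile on the reversed list),
-- then return 'k < len(s) and s[k] != "0" and no digit in s[:k]' (s[k] only read when k < len)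
def numbers_at_end_alt (s : String) : Option Bool :=
  if PySem.Str.strIsalpha s then some true
  else
    let cs := s.toList
    let run := cs.reverse.takeWhile PySem.Chars.isdigit
    let k := cs.length - run.length
    some (decide (k < cs.length) && !(cs.getD k ' ' = '0')
          && !((cs.take k).any PySem.Chars.isdigit))

-- ===== PRECONDITION & SPEC =====
-- Pre_ excludes exactly the strings that are neither alphabetic nor contain a numeric char:
-- there A's loop falls through and returns None instead of a bool (B naturally returns False).
def Pre_numbers_at_end (s : String) : Prop :=
  PySem.Str.strIsalpha s = true ∨ s.toList.any PySem.Chars.isdigit = true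
instance (s : String) : Decidable (Pre_numbers_at_end s) := by unfold Pre_numbers_at_end; infer_instance
def pvWitness_numbers_at_end : String := "AAA123"

def Spec_numbers_at_end (s : String) (out : Option Bool) : Prop := out = numbers_at_end_alt s
instance (s : String) (out : Option Bool) : Decidable (Spec_numbers_at_end s out) := by unfold Spec_numbers_at_end; infer_instance

-- ===== CLAIM (what is proved, stated in full; the proofs are below) =====
def Claim_equal_numbers_at_end : Prop := ∀ (s : String), Dom_numbers_at_end s → Pre_numbers_at_end s → Spec_numbers_at_end s (numbers_at_end s)

-- ===== LEMMAS AND PROOFS =====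

-- B's else-branch body, as a function of the char list
def pvAltBody (cs : List Char) : Option Bool :=
  let run := cs.reverse.takeWhile PySem.Chars.isdigit
  let k := cs.length - run.length
  some (decide (k < cs.length) && !(cs.getD k ' ' = '0')
        && !((cs.take k).any PySem.Chars.isdigit))

theorem takeWhile_append_singleton_of_neg {p : Char → Bool} {l : List Char} {c : Char}
    (h : p c = false) : (l ++ [c]).takeWhile p = l.takeWhile p := by
  induction l with
  | nil => simp [List.takeWhile, h]
  | cons a l ih =>
    simp only [List.cons_append, List.takeWhile_cons]
    cases hp : p a <;> simp [ih]

-- trailing run of (c :: rest) fits inside rest when not the whole string is digits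
theorem run_length_le_of_not_all {c : Char} {rest : List Char}
    (hall : ¬ (∀ x ∈ c :: rest, PySem.Chars.isdigit x = true)) :
    (((c :: rest).reverse).takeWhile PySem.Chars.isdigit).length ≤ rest.length := by
  by_contra hgt
  push Not at hgt
  have hpre := List.takeWhile_prefix (l := (c :: rest).reverse) PySem.Chars.isdigit
  have hle := hpre.length_le
  simp only [List.length_reverse, List.length_cons] at hle
  have heq : (((c :: rest).reverse).takeWhile PySem.Chars.isdigit).length
      = ((c :: rest).reverse).length := by
    simp only [List.length_reverse, List.length_cons]; omega
  have hself := hpre.eq_of_length heq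
  have hxall := List.takeWhile_eq_self_iff.mp hself
  exact hall (fun x hx => hxall x (List.mem_reverse.mpr hx))

theorem pvLoopA_eq_altBody (cs : List Char)
    (hdig : cs.any PySem.Chars.isdigit = true) : pvLoopA cs = pvAltBody cs := by
  induction cs with
  | nil => simp at hdig
  | cons c rest ih =>
    by_cases hd : PySem.Chars.isdigit c = true
    · -- first char is a digit: A decides here
      by_cases hall : ∀ x ∈ c :: rest, PySem.Chars.isdigit x = true
      · -- the whole string is digits: run = everything, k = 0, prefix empty
        have hsd : PySem.Chars.strIsdigit (c :: rest) = true := by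
          simp only [PySem.Chars.strIsdigit, Bool.and_eq_true, List.all_eq_true]
          exact ⟨by simp, hall⟩
        have hrev : ((c :: rest).reverse).takeWhile PySem.Chars.isdigit = (c :: rest).reverse :=
          List.takeWhile_eq_self_iff.mpr (fun x hx => hall x (List.mem_reverse.mp hx))
        simp only [pvLoopA, pvAltBody, hd, hsd, not_true, if_false, hrev,
          List.length_reverse, Nat.sub_self, List.take_zero, List.any_nil,
          List.getD_cons_zero, if_true, Bool.not_false, Bool.and_true]
        rcases eq_or_ne c '0' with h0 | h0
        · subst h0; simp
        · simp [h0]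
      · -- not all digits: A returns False; B's prefix s[:k] contains the digit c (k ≥ 1)
        have hsd : PySem.Chars.strIsdigit (c :: rest) = false := by
          simp only [PySem.Chars.strIsdigit, Bool.and_eq_false_iff]
          right
          simpa [List.all_eq_true] using hall
        have hA : pvLoopA (c :: rest) = some false := by
          rcases eq_or_ne c '0' with h0 | h0
          · subst h0
            have h9 : PySem.Chars.isdigit '0' = true := by decide
            simp [pvLoopA, h9]
          · simp [pvLoopA, hd, h0, hsd]
        have hlen := run_length_le_of_not_all hall
        have hs : rest.length + 1 - (((c :: rest).reverse).takeWhile PySem.Chars.isdigit).length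
            = (rest.length - (((c :: rest).reverse).takeWhile PySem.Chars.isdigit).length) + 1 := by
          omega
        rw [hA]
        simp only [pvAltBody, List.length_cons, hs, List.take_succ_cons, List.any_cons, hd,
          Bool.true_or, Bool.not_true, Bool.and_false]
    · -- first char not a digit: A recurses on rest; c contributes only to B's prefix test
      have hd' : PySem.Chars.isdigit c = false := by simpa using hd
      have hdig' : rest.any PySem.Chars.isdigit = true := by
        simpa [hd'] using hdig
      have hA : pvLoopA (c :: rest) = pvLoopA rest := by simp [pvLoopA, hd]
      have hrunlen : ((rest.reverse).takeWhile PySem.Chars.isdigit).length ≤ rest.length := by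
        have := (List.takeWhile_prefix (l := rest.reverse) PySem.Chars.isdigit).length_le
        simpa using this
      rw [hA, ih hdig']
      simp only [pvAltBody, List.reverse_cons, takeWhile_append_singleton_of_neg hd',
        List.length_cons]
      have e1 : decide (rest.length + 1 - ((rest.reverse).takeWhile PySem.Chars.isdigit).length
            < rest.length + 1)
          = decide (rest.length - ((rest.reverse).takeWhile PySem.Chars.isdigit).length
            < rest.length) := by
        simp only [decide_eq_decide]; omega
      have hs : rest.length + 1 - ((rest.reverse).takeWhile PySem.Chars.isdigit).length
          = (rest.length - ((rest.reverse).takeWhile PySem.Chars.isdigit).length) + 1 := by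
        omega
      rw [e1, hs, List.getD_cons_succ, List.take_succ_cons, List.any_cons, hd', Bool.false_or]

theorem numbers_at_end_spec : Claim_equal_numbers_at_end := by
  intro s _ hpre
  unfold Spec_numbers_at_end numbers_at_end numbers_at_end_alt
  by_cases h : PySem.Str.strIsalpha s = true
  · rw [if_pos h, if_pos h]
  · rw [if_neg h, if_neg h]
    rcases hpre with hpre | hpre
    · exact absurd hpre h
    · exact pvLoopA_eq_altBody s.toList hpre
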